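-- pv_equiv track=rewrite | github.com/Yyuzhuohang/EA-net | make_data.py | get_mei2id
-- ===== SOURCE A (Python) =====
-- def get_mei2id(titles):
--     ret={}
--     for mei in titles:
--         mei_lst=mei.split("+")
--         for m in mei_lst:
--             if m not in ret:
--                 ret[m]=len(ret)+1
--     return ret
-- ===== SOURCE B (Python) =====
-- def get_mei2id(titles):
--     stream = [m for t in titles for m in t.split("+")]
--     first = {}
--     for i, tok in reversed(list(enumerate(stream))):
--         first[tok] = i
--     order = sorted(first, key=first.get)
--     return {tok: r for r, tok in enumerate(order, 1)}
-- ===== Notes on version B (the rewrite author's own statement) =====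
-- stated objective: alternative
-- what changed: Instead of numbering tokens as they are first seen with a guarded dict, B computes each token's first-occurrence position by one REVERSE overwrite pass over the enumerated flattened stream, SORTS the distinct tokens by that position, and ranks the sorted list from 1; the sort reconstructs first-appearance order because first-occurrence positions are distinct.
import Mathlib
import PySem

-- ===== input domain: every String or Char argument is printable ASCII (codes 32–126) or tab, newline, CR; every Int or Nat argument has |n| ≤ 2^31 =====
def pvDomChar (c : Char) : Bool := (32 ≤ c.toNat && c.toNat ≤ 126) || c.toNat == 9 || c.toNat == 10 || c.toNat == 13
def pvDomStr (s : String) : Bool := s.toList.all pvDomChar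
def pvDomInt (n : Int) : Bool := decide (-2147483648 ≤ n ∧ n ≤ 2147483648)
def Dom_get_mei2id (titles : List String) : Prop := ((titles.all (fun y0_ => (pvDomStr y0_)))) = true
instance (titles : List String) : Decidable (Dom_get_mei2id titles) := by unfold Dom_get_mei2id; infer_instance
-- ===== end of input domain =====

-- B replaces A's number-as-you-go guarded dict by: one reverse overwrite pass recording each token's
-- first-occurrence position, a sort of the distinct tokens by that position, then ranking from 1.

-- ===== PORT A =====
-- mei.split("+"): the separator "+" is a nonempty literal, so split? never returns none and .getD [] is exact
def pvSplitPlus (s : String) : List String := (PySem.Str.split? s "+").getD []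

-- 'if m not in ret: ret[m] = len(ret)+1' on the association list (dict in insertion order)
def pvStepA (ret : List (String × Int)) (m : String) : List (String × Int) :=
  if (ret.map (·.1)).contains m then ret else ret ++ [(m, (ret.length : Int) + 1)]

def get_mei2id (titles : List String) : List (String × Int) :=
  titles.foldl (fun ret mei => (pvSplitPlus mei).foldl pvStepA ret) []

-- ===== PORT B =====
def get_mei2id_alt (titles : List String) : List (String × Int) :=
  let stream := titles.flatMap (fun t => pvSplitPlus t)
  -- for i, tok in reversed(list(enumerate(stream))): first[tok] = i
  let first := ((PySem.List.enumerate stream 0).reverse).foldl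
      (fun d p => d.insert p.2 p.1) PySem.Dict.empty
  -- sorted(first, key=first.get): iterate the dict's keys; every key is in the dict, so
  -- first.get never returns None and '.getD 0' is exact
  let order := PySem.List.sorted first.keys (fun tok => first.getD tok 0) false
  (PySem.List.enumerate order 1).map (fun p => (p.2, p.1))

-- ===== PRECONDITION & SPEC =====
def Spec_get_mei2id (titles : List String) (out : List (String × Int)) : Prop := out = get_mei2id_alt titles
instance (titles : List String) (out : List (String × Int)) : Decidable (Spec_get_mei2id titles out) := by unfold Spec_get_mei2id; infer_instance

-- ===== CLAIM (what is proved, stated in full; the proofs are below) =====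
def Claim_equal_get_mei2id : Prop := ∀ (titles : List String), Dom_get_mei2id titles → Spec_get_mei2id titles (get_mei2id titles)

-- ===== LEMMAS AND PROOFS =====

-- the assoc list both sides produce from a key list: keys paired with ids 1,2,3,…
def pvEnum1 (us : List String) : List (String × Int) :=
  (PySem.List.enumerate us 1).map (fun p => (p.2, p.1))

theorem pvEnum1_fst (us : List String) : (pvEnum1 us).map (·.1) = us := by
  simp [pvEnum1, List.map_map, Function.comp_def, PySem.List.map_snd_enumerate]

theorem pvEnum1_length (us : List String) : (pvEnum1 us).length = us.length := by
  simp [pvEnum1, PySem.List.length_enumerate]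

theorem pvEnum1_append_one (us : List String) (m : String) :
    pvEnum1 (us ++ [m]) = pvEnum1 us ++ [(m, (us.length : Int) + 1)] := by
  simp [pvEnum1, PySem.List.enumerate_append, PySem.List.enumerate_cons,
    PySem.List.enumerate_nil]
  ring

theorem pvStepA_enum1 (us : List String) (m : String) :
    pvStepA (pvEnum1 us) m = pvEnum1 (PySem.Set.add us m) := by
  unfold pvStepA PySem.Set.add
  rw [pvEnum1_fst, pvEnum1_length]
  by_cases h : m ∈ us
  · simp [h]
  · simp [h, pvEnum1_append_one]

theorem pvFoldA_enum1 (stream : List String) (us : List String) :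
    stream.foldl pvStepA (pvEnum1 us) = pvEnum1 (stream.foldl PySem.Set.add us) := by
  induction stream generalizing us with
  | nil => rfl
  | cons x xs ih => simp only [List.foldl_cons, pvStepA_enum1, ih]

theorem pvNested_eq_flat (titles : List String) (init : List (String × Int)) :
    titles.foldl (fun ret mei => (pvSplitPlus mei).foldl pvStepA ret) init
      = (titles.flatMap (fun title => pvSplitPlus title)).foldl pvStepA init := by
  induction titles generalizing init with
  | nil => rfl
  | cons t ts ih => simp only [List.foldl_cons, List.flatMap_cons, List.foldl_append, ih]

-- first-occurrence position of a token (Python stream.index, as a Nat)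
def pvIdx (stream : List String) (tok : String) : Nat :=
  (PySem.List.index? stream tok).getD 0

theorem pvIdx_lt_length {xs : List String} {a : String} (h : a ∈ xs) :
    pvIdx xs a < xs.length := by
  have hs : (PySem.List.index? xs a).isSome := (PySem.List.index?_isSome_iff xs a).mpr h
  obtain ⟨k, hk⟩ := Option.isSome_iff_exists.mp hs
  obtain ⟨hlt, -, -⟩ := PySem.List.getElem_of_index?_eq_some hk
  unfold pvIdx
  rw [hk]
  exact hlt

theorem pvIdx_append_of_mem {xs : List String} (t : List String) {a : String} (h : a ∈ xs) :
    pvIdx (xs ++ t) a = pvIdx xs a := by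
  unfold pvIdx
  rw [PySem.List.index?_append_of_mem t h]

theorem pvIdx_append_self {xs : List String} {x : String} (h : x ∉ xs) :
    pvIdx (xs ++ [x]) x = xs.length := by
  unfold pvIdx
  rw [PySem.List.index?_append_singleton_self xs x h]
  rfl

-- set-of-first-occurrences is strictly increasing in first-occurrence position
theorem pvOfList_pairwise_idx (xs : List String) :
    (PySem.Set.ofList xs).Pairwise (fun a b => pvIdx xs a < pvIdx xs b) := by
  induction xs using List.reverseRecOn with
  | nil => simp [PySem.Set.ofList]
  | append_singleton xs x ih =>
    have hof : PySem.Set.ofList (xs ++ [x]) = PySem.Set.add (PySem.Set.ofList xs) x := by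
      simp [PySem.Set.ofList_eq_foldl, List.foldl_append]
    rw [hof]
    have hpw : (PySem.Set.ofList xs).Pairwise (fun a b => pvIdx (xs ++ [x]) a < pvIdx (xs ++ [x]) b) := by
      refine ih.imp_of_mem (fun {a b} ha hb hab => ?_)
      rw [pvIdx_append_of_mem [x] ((PySem.Set.mem_ofList _ _).mp ha),
          pvIdx_append_of_mem [x] ((PySem.Set.mem_ofList _ _).mp hb)]
      exact hab
    unfold PySem.Set.add
    by_cases hx : x ∈ PySem.Set.ofList xs
    · simp [PySem.Set.contains, hx, hpw]
    · have hxs : x ∉ xs := fun h => hx ((PySem.Set.mem_ofList _ _).mpr h)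
      simp only [PySem.Set.contains, List.contains_eq_mem, hx, decide_false, Bool.false_eq_true,
        if_false]
      rw [List.pairwise_append]
      refine ⟨hpw, List.pairwise_singleton _ _, ?_⟩
      intro a ha b hb
      rw [List.mem_singleton] at hb
      rw [hb]
      have hamem : a ∈ xs := (PySem.Set.mem_ofList _ _).mp ha
      rw [pvIdx_append_of_mem [x] hamem, pvIdx_append_self hxs]
      exact pvIdx_lt_length hamem

-- lookup in a dict built by a fold of inserts: the LAST pair with the key wins
theorem pvGetD_fold_insert (L : List (Int × String)) (d : PySem.Dict String Int)
    (k : String) (d0 : Int) :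
    (L.foldl (fun d p => d.insert p.2 p.1) d).getD k d0 =
      match L.reverse.find? (fun p => p.2 == k) with
      | some p => p.1
      | none => d.getD k d0 := by
  induction L using List.reverseRecOn with
  | nil => simp
  | append_singleton L p ih =>
    rw [List.foldl_append, List.reverse_append]
    simp only [List.foldl_cons, List.foldl_nil, List.reverse_singleton, List.singleton_append]
    rw [PySem.Dict.getD_insert]
    by_cases hk : k = p.2
    · rw [if_pos hk, List.find?_cons_of_pos (by simp [hk])]
    · rw [if_neg hk, List.find?_cons_of_neg (by simp [Ne.symm hk]), ih]

-- find? over an enumeration is index?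
theorem pvFind_enum (xs : List String) (tok : String) (s : Int) :
    (PySem.List.enumerate xs s).find? (fun p => p.2 == tok)
      = (PySem.List.index? xs tok).map (fun k => ((s + (k : Int)), tok)) := by
  induction xs generalizing s with
  | nil => simp [PySem.List.enumerate_nil]
  | cons x xs ih =>
    rw [PySem.List.enumerate_cons]
    by_cases hx : x = tok
    · subst hx
      rw [List.find?_cons_of_pos (by simp), PySem.List.index?_cons_self]
      simp
    · rw [List.find?_cons_of_neg (by simp [hx]), PySem.List.index?_cons_of_ne xs hx, ih (s + 1)]
      cases PySem.List.index? xs tok with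
      | none => rfl
      | some k => simp; ring

-- the reverse overwrite pass records each member token's first-occurrence position
theorem pvFirst_getD (stream : List String) {tok : String} (h : tok ∈ stream) :
    (((PySem.List.enumerate stream 0).reverse).foldl
        (fun d p => d.insert p.2 p.1) PySem.Dict.empty).getD tok 0
      = (pvIdx stream tok : Int) := by
  rw [pvGetD_fold_insert, List.reverse_reverse, pvFind_enum stream tok 0]
  have hs : (PySem.List.index? stream tok).isSome :=
    (PySem.List.index?_isSome_iff stream tok).mpr h
  obtain ⟨k, hk⟩ := Option.isSome_iff_exists.mp hs
  rw [hk]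
  have hk' : List.idxOf? tok stream = some k := by
    rw [← PySem.List.index?_eq_idxOf?]; exact hk
  simp [pvIdx, hk']

-- the dict's key list holds exactly the distinct tokens
theorem pvFirst_keys (stream : List String) :
    (((PySem.List.enumerate stream 0).reverse).foldl
        (fun d p => d.insert p.2 p.1) PySem.Dict.empty).keys
      = PySem.Set.ofList stream.reverse := by
  have h := PySem.Dict.keys_foldl_insert_key (ν := Int)
    ((PySem.List.enumerate stream 0).reverse) (fun p => p.2) (fun _ p => p.1) PySem.Dict.empty
  have hmap : ((PySem.List.enumerate stream 0).reverse).map (fun p => p.2) = stream.reverse := by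
    rw [List.map_reverse, PySem.List.map_snd_enumerate]
  rw [hmap] at h
  exact h.trans rfl

-- sorting the keys by first-occurrence position reconstructs first-appearance order
theorem pvSorted_keys (stream : List String) :
    PySem.List.sorted
        ((((PySem.List.enumerate stream 0).reverse).foldl
            (fun d p => d.insert p.2 p.1) PySem.Dict.empty).keys)
        (fun tok => (((PySem.List.enumerate stream 0).reverse).foldl
            (fun d p => d.insert p.2 p.1) PySem.Dict.empty).getD tok 0)
      = PySem.Set.ofList stream := by
  apply PySem.List.sorted_eq_of_perm_of_pairwise_lt
  · rw [pvFirst_keys]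
    rw [List.perm_ext_iff_of_nodup (PySem.Set.nodup_ofList _) (PySem.Set.nodup_ofList _)]
    intro a
    rw [PySem.Set.mem_ofList, PySem.Set.mem_ofList, List.mem_reverse]
  · refine (pvOfList_pairwise_idx stream).imp_of_mem (fun {a b} ha hb hab => ?_)
    rw [pvFirst_getD stream ((PySem.Set.mem_ofList _ _).mp ha),
        pvFirst_getD stream ((PySem.Set.mem_ofList _ _).mp hb)]
    exact_mod_cast hab

-- ===== VERDICT (by name: the statement is the Claim_ definition above) =====
theorem get_mei2id_spec : Claim_equal_get_mei2id := by
  intro titles _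
  show get_mei2id titles = get_mei2id_alt titles
  unfold get_mei2id get_mei2id_alt
  rw [pvNested_eq_flat]
  have h0 : ([] : List (String × Int)) = pvEnum1 [] := rfl
  rw [h0, pvFoldA_enum1]
  show pvEnum1 _ = pvEnum1 _
  rw [pvSorted_keys]
  rw [PySem.Set.ofList_eq_foldl]
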